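-- pv_equiv track=rewrite | github.com/splatpope/KNIFER | architectures/common.py | disc_features
-- ===== SOURCE A (Python) =====
-- def disc_features(
--         n_layers: int,
--         base_features: int,
--         features_list: "list[int]" = []
--     ) -> "list[int]":
--     """Derive list of features for generator tail layers.
--
--     Args:
--         n_layers (int): Amount of tail layers.
--         base_features (int): Base amount of features.
--             (i.e. in_c of the first mid layer)
--         feature_list (list[int], optional): List of in_c for the tail layers.
--             If missing, every layer will have double the preceding layer's features.
--             Defaults to None.
--     """
--
--     if not features_list:
--         features_list = [base_features]
--     assert features_list[0] == base_features, "Bogus features list."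
--     adds = [features_list[-1] * 2**(i+1) for i in range(n_layers - len(features_list))]
--     return features_list + adds
-- ===== SOURCE B (Python) =====
-- def _grow(fl, n_layers):
--     # Recursively extend until the list reaches n_layers entries,
--     # each new entry doubling the current last one.
--     if len(fl) >= n_layers:
--         return fl
--     return _grow(fl + [fl[-1] * 2], n_layers)
--
--
-- def disc_features(
--         n_layers: int,
--         base_features: int,
--         features_list: "list[int]" = []
--     ) -> "list[int]":
--     # Recursive grow-until-long-enough: no count of missing entries is ever
--     # computed and no powers are formed; the argument is never mutated.
--     fl = list(features_list) or [base_features]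
--     assert fl[0] == base_features, "Bogus features list."
--     return _grow(fl, n_layers)
-- ===== Notes on version B (the rewrite author's own statement) =====
-- stated objective: alternative
-- what changed: B replaces A's counted comprehension of powers (last*2**(i+1) over range(n-len)) by a recursive grow-until-long-enough procedure that never computes the number of missing entries or any power: it repeatedly appends double of the current last element until the list has n_layers entries.
import Mathlib
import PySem

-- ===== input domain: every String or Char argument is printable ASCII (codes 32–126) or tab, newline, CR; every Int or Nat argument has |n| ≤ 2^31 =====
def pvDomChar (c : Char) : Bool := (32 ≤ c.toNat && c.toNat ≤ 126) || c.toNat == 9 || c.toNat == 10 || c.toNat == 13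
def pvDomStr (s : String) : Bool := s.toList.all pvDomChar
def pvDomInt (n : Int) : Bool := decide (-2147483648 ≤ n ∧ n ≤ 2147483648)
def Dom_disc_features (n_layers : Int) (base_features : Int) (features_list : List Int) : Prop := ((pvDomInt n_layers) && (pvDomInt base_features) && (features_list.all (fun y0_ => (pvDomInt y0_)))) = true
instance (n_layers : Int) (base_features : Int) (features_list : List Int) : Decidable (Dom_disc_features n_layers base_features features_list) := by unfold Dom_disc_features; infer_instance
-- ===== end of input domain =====

-- B grows the list recursively by doubling its last element until it reaches n_layers entries, instead of A's counted comprehension of powers; return values proved equal wherever A's assert passes.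


-- ===== PORT A =====
-- literal port of A: default the list, then append the comprehension
-- [features_list[-1] * 2**(i+1) for i in range(n_layers - len(features_list))].
-- fl is nonempty by construction, so fl[-1] never raises; getD 0 is unreachable.
def disc_features (n_layers : Int) (base_features : Int) (features_list : List Int) : List Int :=
  let fl := if features_list = [] then [base_features] else features_list
  let last := (PySem.List.pyGet? fl (-1)).getD 0
  let adds := (PySem.List.pyRange 0 (n_layers - fl.length) 1).map (fun i => last * 2 ^ (i + 1).toNat)
  fl ++ adds

-- ===== PORT B =====
-- B's recursive helper _grow: extend with double of the last element until length n_layers.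
-- fl is nonempty on every call from disc_features_alt, so fl[-1] never raises; getD 0 is unreachable.
def discGrow (fl : List Int) (n_layers : Int) : List Int :=
  if (n_layers : Int) ≤ fl.length then fl
  else discGrow (fl ++ [((PySem.List.pyGet? fl (-1)).getD 0) * 2]) n_layers
termination_by (n_layers - fl.length).toNat
decreasing_by simp only [List.length_append, List.length_cons, List.length_nil]; omega

def disc_features_alt (n_layers : Int) (base_features : Int) (features_list : List Int) : List Int :=
  let fl := if features_list = [] then [base_features] else features_list
  discGrow fl n_layers

-- ===== PRECONDITION & SPEC =====
-- Pre_ excludes exactly the inputs on which A's assert fails (AssertionError):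
-- a nonempty features_list whose head differs from base_features.
def Pre_disc_features (n_layers : Int) (base_features : Int) (features_list : List Int) : Prop :=
  features_list = [] ∨ features_list.head? = some base_features
instance (n_layers : Int) (base_features : Int) (features_list : List Int) : Decidable (Pre_disc_features n_layers base_features features_list) := by unfold Pre_disc_features; infer_instance

def pvWitness_disc_features : Int × Int × List Int := (4, 3, [3, 7])

def Spec_disc_features (n_layers : Int) (base_features : Int) (features_list : List Int) (out : List Int) : Prop := out = disc_features_alt n_layers base_features features_list
instance (n_layers : Int) (base_features : Int) (features_list : List Int) (out : List Int) : Decidable (Spec_disc_features n_layers base_features features_list out) := by unfold Spec_disc_features; infer_instance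

-- ===== CLAIM (what is proved, stated in full; the proofs are below) =====
def Claim_equal_disc_features : Prop := ∀ (n_layers : Int) (base_features : Int) (features_list : List Int), Dom_disc_features n_layers base_features features_list → Pre_disc_features n_layers base_features features_list → Spec_disc_features n_layers base_features features_list (disc_features n_layers base_features features_list)

-- ===== LEMMAS AND PROOFS =====

-- A's tail of powers over range(k) equals k steps of B's recursive doubling, for nonempty fl.
theorem discGrow_eq (k : Nat) : ∀ (fl : List Int) (n : Int), fl ≠ [] → (n - fl.length).toNat = k →
    discGrow fl n =
      fl ++ (List.range k).map (fun j => ((PySem.List.pyGet? fl (-1)).getD 0) * 2 ^ (j + 1)) := by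
  induction k with
  | zero =>
      intro fl n _ hk
      rw [discGrow]
      simp only [List.range_zero, List.map_nil, List.append_nil]
      rw [if_pos (by omega)]
  | succ k ih =>
      intro fl n hne hk
      rw [discGrow, if_neg (by omega)]
      set c := ((PySem.List.pyGet? fl (-1)).getD 0) with hc
      have hlast : (PySem.List.pyGet? (fl ++ [c * 2]) (-1)).getD 0 = c * 2 := by
        rw [PySem.List.pyGet?_neg_one_append_singleton]; rfl
      rw [ih (fl ++ [c * 2]) n (by simp) (by simp only [List.length_append, List.length_cons, List.length_nil]; omega)]
      rw [hlast, List.append_assoc, List.range_succ_eq_map]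
      simp only [List.map_cons, List.map_map, List.cons_append, List.nil_append]
      refine congrArg (fl ++ ·) (List.cons_eq_cons.mpr ⟨by ring, ?_⟩)
      apply List.map_congr_left
      intro j _
      simp only [Function.comp, Nat.succ_eq_add_one, pow_succ]
      ring

-- A's pyRange comprehension rewritten over Nat range.
theorem adds_eq_range (m cur : Int) :
    (PySem.List.pyRange 0 m 1).map (fun i => cur * 2 ^ (i + 1).toNat) =
      (List.range m.toNat).map (fun j => cur * 2 ^ (j + 1)) := by
  rw [PySem.List.pyRange_one]
  simp only [List.map_map, Int.sub_zero]
  apply List.map_congr_left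
  intro j _
  simp only [Function.comp]
  congr 2
  omega

-- ===== VERDICT (by name: the statement is the Claim_ definition above) =====
theorem disc_features_spec : Claim_equal_disc_features := by
  intro n b fl _ _
  unfold Spec_disc_features disc_features disc_features_alt
  simp only
  rw [adds_eq_range]
  rw [discGrow_eq (n - (if fl = [] then [b] else fl).length).toNat _ n
      (by split <;> simp_all) rfl]
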